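-- pv_equiv track=rewrite | github.com/Eliander/ALGO2020 | rank_unrank/rank_unrank_ABstrings.py | ABstring2rank
-- ===== SOURCE A (Python) =====
-- def ABstring2rank(s):
--     count = 0
--     exp = 0
--     for i in range(len(s) - 1, -1, -1):
--         if s[i] == 'B':
--             count = count + (2**exp)
--         exp += 1
--     return count
-- ===== SOURCE B (Python) =====
-- def ABstring2rank(s):
--     count = 0
--     for c in s:
--         count = count * 2 + (1 if c == 'B' else 0)
--     return count
-- ===== Notes on version B (the rewrite author's own statement) =====
-- stated objective: idiomatic
-- what changed: B scans the string forward with Horner's shift-and-add accumulation (count = count*2 + bit), removing A's reversed index loop, the exp counter and the 2**exp power computation.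
import Mathlib
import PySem

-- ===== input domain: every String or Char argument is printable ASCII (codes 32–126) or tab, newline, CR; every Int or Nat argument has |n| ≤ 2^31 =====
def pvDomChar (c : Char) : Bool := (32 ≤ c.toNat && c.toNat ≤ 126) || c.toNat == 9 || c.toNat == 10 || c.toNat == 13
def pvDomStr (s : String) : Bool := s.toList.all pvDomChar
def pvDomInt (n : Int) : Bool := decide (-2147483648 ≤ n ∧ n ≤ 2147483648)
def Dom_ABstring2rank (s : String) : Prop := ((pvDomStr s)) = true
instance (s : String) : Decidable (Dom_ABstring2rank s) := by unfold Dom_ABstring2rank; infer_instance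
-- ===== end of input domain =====

-- B replaces A's reversed-index loop with exp/2**exp state by a forward Horner scan (count = count*2 + bit); same result, no speed claim.

-- ===== PORT A =====
def ABstring2rank (s : String) : Int :=
  (((PySem.List.pyRange (PySem.Str.len s - 1) (-1) (-1)).foldl
      (fun (st : Int × Int) i =>
        ((if PySem.Str.pyGet? s i = some 'B' then st.1 + 2 ^ st.2.toNat else st.1), st.2 + 1))
      (0, 0))).1

-- ===== PORT B =====
def ABstring2rank_alt (s : String) : Int :=
  s.toList.foldl (fun count c => count * 2 + (if c = 'B' then 1 else 0)) 0

-- ===== PRECONDITION & SPEC =====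
def Spec_ABstring2rank (s : String) (out : Int) : Prop := out = ABstring2rank_alt s
instance (s : String) (out : Int) : Decidable (Spec_ABstring2rank s out) := by unfold Spec_ABstring2rank; infer_instance

-- ===== CLAIM (what is proved, stated in full; the proofs are below) =====
def Claim_equal_ABstring2rank : Prop := ∀ (s : String), Dom_ABstring2rank s → Spec_ABstring2rank s (ABstring2rank s)

-- ===== LEMMAS AND PROOFS =====

-- A's countdown loop from index m-1 with state (c, e) adds 2^e.toNat·(Horner value of the first m chars) to c.
theorem ABloop_eq (s : String) :
    ∀ (m : Nat), m ≤ s.toList.length → ∀ (c e : Int), 0 ≤ e →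
    ((PySem.List.pyRange ((m : Int) - 1) (-1) (-1)).foldl
      (fun (st : Int × Int) i =>
        ((if PySem.Str.pyGet? s i = some 'B' then st.1 + 2 ^ st.2.toNat else st.1), st.2 + 1))
      (c, e)).1
    = c + 2 ^ e.toNat *
        ((s.toList.take m).foldl (fun count ch => count * 2 + (if ch = 'B' then 1 else 0)) 0) := by
  intro m
  induction m with
  | zero =>
    intro _ c e _
    rw [PySem.List.pyRange_neg_one_eq_nil (by norm_num)]
    simp
  | succ k ih =>
    intro hm c e he
    have hk : k < s.toList.length := by omega
    have hcast : ((k : Int) + 1) - 1 = (k : Int) := by ring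
    rw [show (((k + 1 : Nat) : Int) - 1) = (k : Int) by push_cast; ring]
    rw [PySem.List.pyRange_neg_one_cons (by omega)]
    rw [List.foldl_cons]
    have hget : PySem.Str.pyGet? s (k : Int) = some s.toList[k] := by
      simp [List.getElem?_eq_getElem hk]
    have htake : s.toList.take (k + 1) = s.toList.take k ++ [s.toList[k]] := by
      rw [List.take_add_one, List.getElem?_eq_getElem hk]
      rfl
    have htn : (e + 1).toNat = e.toNat + 1 := by omega
    rw [ih (by omega) _ (e + 1) (by omega), hget, htn, htake, List.foldl_append]
    simp only [List.foldl_cons, List.foldl_nil]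
    split <;> rename_i h <;> simp only [Option.some.injEq] at h <;> simp only [h, if_true, reduceIte] <;> ring
-- ===== VERDICT (by name: the statement is the Claim_ definition above) =====
theorem ABstring2rank_spec : Claim_equal_ABstring2rank := by
  intro s _
  unfold Spec_ABstring2rank ABstring2rank ABstring2rank_alt
  have h := ABloop_eq s s.toList.length le_rfl 0 0 le_rfl
  rw [List.take_length] at h
  simpa [PySem.Str.len_eq] using h
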